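-- pv_equiv track=rewrite | github.com/RedHatInsights/tangerine-backend | connectors/vector_store/db.py | remove_large_code_blocks
-- ===== SOURCE A (Python) =====
-- def remove_large_code_blocks(text):
--     lines = []
--     code_lines = []
--     in_code_block = False
--     for line in text.split("\n"):
--         if line.strip() == "```" and not in_code_block:
--             in_code_block = True
--             code_lines = []
--             code_lines.append(line)
--         elif line.strip() == "```" and in_code_block:
--             code_lines.append(line)
--             in_code_block = False
--             if len(code_lines) > 9:
--                 code_lines = ["```", "<large code block, visit documentation to view>", "```"]
--             lines.extend(code_lines)
--         elif in_code_block: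
--             code_lines.append(line)
--         else:
--             lines.append(line)
--
--     return "\n".join(lines)
-- ===== SOURCE B (Python) =====
-- def remove_large_code_blocks(text):
--     PLACEHOLDER = ["```", "<large code block, visit documentation to view>", "```"]
--
--     def find_fence(lines):
--         for i, line in enumerate(lines):
--             if line.strip() == "```":
--                 return i
--         return None
--
--     def go(lines):
--         s = find_fence(lines)
--         if s is None:
--             return lines
--         e = find_fence(lines[s + 1:])
--         if e is None:
--             return lines[:s]
--         block = lines[s:s + e + 2]
--         if len(block) > 9:
--             block = PLACEHOLDER
--         return lines[:s] + block + go(lines[s + e + 2:])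
--
--     return "\n".join(go(text.split("\n")))
-- ===== Notes on version B (the rewrite author's own statement) =====
-- stated objective: alternative
-- what changed: Replaced A's single-pass in/out-of-code-block state machine with a recursive decomposition that locates the next pair of fence lines, emits the prefix and the (possibly collapsed) block, and recurses on the remaining suffix.
import Mathlib
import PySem

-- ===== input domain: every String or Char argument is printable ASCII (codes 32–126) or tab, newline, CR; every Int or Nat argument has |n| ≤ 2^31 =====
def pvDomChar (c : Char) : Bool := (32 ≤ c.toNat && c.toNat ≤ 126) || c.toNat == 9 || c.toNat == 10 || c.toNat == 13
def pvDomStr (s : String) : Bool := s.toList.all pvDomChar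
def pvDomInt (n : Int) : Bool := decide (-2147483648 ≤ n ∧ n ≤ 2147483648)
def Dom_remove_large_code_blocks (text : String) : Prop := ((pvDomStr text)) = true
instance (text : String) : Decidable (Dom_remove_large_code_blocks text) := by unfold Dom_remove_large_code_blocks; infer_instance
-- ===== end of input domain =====

-- B collapses fenced blocks by recursively locating the next fence pair instead of A's
-- single-pass in/out state machine; objective: alternative decomposition (same cost).

-- ===== PORT A =====
-- one loop iteration of A: state = (lines, code_lines, in_code_block)
def pvStepA (st : List String × List String × Bool) (line : String) :
    List String × List String × Bool :=
  if (PySem.Str.strip line == "```") && !st.2.2 then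
    (st.1, [line], true)
  else if (PySem.Str.strip line == "```") && st.2.2 then
    let code := st.2.1 ++ [line]
    let code := if code.length > 9 then
      ["```", "<large code block, visit documentation to view>", "```"] else code
    (st.1 ++ code, code, false)
  else if st.2.2 then
    (st.1, st.2.1 ++ [line], st.2.2)
  else
    (st.1 ++ [line], st.2.1, st.2.2)

def remove_large_code_blocks (text : String) : String :=
  PySem.Str.join "\n" (((PySem.Str.split? text "\n").getD []).foldl pvStepA ([], [], false)).1

-- ===== PORT B =====
-- B's find_fence: index of the first line whose strip() is "```"
def pvFindFence : List String → Option Nat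
  | [] => none
  | l :: ls =>
    if PySem.Str.strip l == "```" then some 0
    else (pvFindFence ls).map (· + 1)

theorem pvFindFence_lt_length {ls : List String} {s : Nat}
    (h : pvFindFence ls = some s) : s < ls.length := by
  induction ls generalizing s with
  | nil => simp [pvFindFence] at h
  | cons l t ih =>
    simp only [pvFindFence] at h
    split at h
    · injection h with h; simp; omega
    · cases h2 : pvFindFence t with
      | none => simp [h2] at h
      | some m =>
        simp only [h2, Option.map_some] at h
        injection h with h
        subst h
        simpa using Nat.succ_lt_succ (ih h2)

-- B's go: recursion on the suffix after each collapsed/kept fence pair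
def pvGo (lines : List String) : List String :=
  match h : pvFindFence lines with
  | none => lines
  | some s =>
    match h2 : pvFindFence (lines.drop (s + 1)) with
    | none => lines.take s
    | some e =>
      let block := (lines.take (s + e + 2)).drop s
      let block := if block.length > 9 then
        ["```", "<large code block, visit documentation to view>", "```"] else block
      lines.take s ++ block ++ pvGo (lines.drop (s + e + 2))
termination_by lines.length
decreasing_by
  have hs := pvFindFence_lt_length h
  simp only [List.length_drop]
  omega

def remove_large_code_blocks_alt (text : String) : String :=
  PySem.Str.join "\n" (pvGo ((PySem.Str.split? text "\n").getD []))

-- ===== PRECONDITION & SPEC =====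
def Spec_remove_large_code_blocks (text : String) (out : String) : Prop := out = remove_large_code_blocks_alt text
instance (text : String) (out : String) : Decidable (Spec_remove_large_code_blocks text out) := by unfold Spec_remove_large_code_blocks; infer_instance

-- ===== CLAIM (what is proved, stated in full; the proofs are below) =====
def Claim_equal_remove_large_code_blocks : Prop := ∀ (text : String), Dom_remove_large_code_blocks text → Spec_remove_large_code_blocks text (remove_large_code_blocks text)

-- ===== LEMMAS AND PROOFS =====

theorem pvFindFence_none {ls : List String} (h : pvFindFence ls = none) :
    ∀ x ∈ ls, (PySem.Str.strip x == "```") = false := by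
  induction ls with
  | nil => simp
  | cons l t ih =>
    cases hf : (PySem.Str.strip l == "```") with
    | true => rw [pvFindFence, if_pos hf] at h; exact absurd h (by simp)
    | false =>
      rw [pvFindFence, if_neg (by simp [hf])] at h
      intro x hx
      rcases List.mem_cons.mp hx with rfl | hx
      · exact hf
      · exact ih (by cases h2 : pvFindFence t <;> simp [h2] at h ⊢) x hx

theorem pvFindFence_some {ls : List String} {s : Nat} (h : pvFindFence ls = some s) :
    ∃ pre l post, ls = pre ++ l :: post ∧ pre.length = s ∧
      (∀ x ∈ pre, (PySem.Str.strip x == "```") = false) ∧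
      (PySem.Str.strip l == "```") = true := by
  induction ls generalizing s with
  | nil => simp [pvFindFence] at h
  | cons l t ih =>
    cases hf : (PySem.Str.strip l == "```") with
    | true =>
      rw [pvFindFence, if_pos hf] at h
      injection h with h
      exact ⟨[], l, t, by simp, by simpa using h, by simp, hf⟩
    | false =>
      rw [pvFindFence, if_neg (by simp [hf])] at h
      cases h2 : pvFindFence t with
      | none => simp [h2] at h
      | some m =>
        simp only [h2, Option.map_some] at h
        injection h with h
        obtain ⟨pre, l', post, heq, hlen, hpre, hl⟩ := ih h2
        refine ⟨l :: pre, l', post, by simp [heq], by simp [hlen, ← h], ?_, hl⟩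
        intro x hx
        rcases List.mem_cons.mp hx with rfl | hx
        · exact hf
        · exact hpre x hx

-- the step's output accumulator only ever appends to its input accumulator
theorem pvStepA_acc (acc : List String) (cb : List String × Bool) (l : String) :
    pvStepA (acc, cb) l = (acc ++ (pvStepA ([], cb) l).1, (pvStepA ([], cb) l).2) := by
  unfold pvStepA; split_ifs <;> simp

-- A's accumulator is append-only
theorem foldl_acc_append (ls : List String) (acc : List String)
    (cb : List String × Bool) :
    (ls.foldl pvStepA (acc, cb)).1 = acc ++ (ls.foldl pvStepA ([], cb)).1 := by
  induction ls generalizing acc cb with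
  | nil => simp
  | cons l t ih =>
    simp only [List.foldl_cons]
    rw [pvStepA_acc, ih]
    conv_rhs => rw [pvStepA_acc, ih]
    simp

-- from the false state the code_lines component is never read
theorem foldl_code_irrel (ls : List String) (acc c c' : List String) :
    (ls.foldl pvStepA (acc, c, false)).1 = (ls.foldl pvStepA (acc, c', false)).1 := by
  induction ls generalizing acc c c' with
  | nil => rfl
  | cons l t ih =>
    by_cases hf : (PySem.Str.strip l == "```") = true
    · simp [List.foldl_cons, pvStepA, hf]
    · simp only [List.foldl_cons,
        show pvStepA (acc, c, false) l = (acc ++ [l], c, false) by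
          simp [pvStepA, hf],
        show pvStepA (acc, c', false) l = (acc ++ [l], c', false) by
          simp [pvStepA, hf]]
      exact ih _ _ _

-- a fence-free run in the false state just copies lines
theorem run_false_clean (pre rest : List String)
    (hpre : ∀ x ∈ pre, (PySem.Str.strip x == "```") = false)
    (acc c : List String) :
    (pre ++ rest).foldl pvStepA (acc, c, false) =
      rest.foldl pvStepA (acc ++ pre, c, false) := by
  induction pre generalizing acc with
  | nil => simp
  | cons l t ih =>
    have hl := hpre l (by simp)
    simp only [List.cons_append, List.foldl_cons,
      show pvStepA (acc, c, false) l = (acc ++ [l], c, false) by simp [pvStepA, hl]]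
    rw [ih (fun x hx => hpre x (by simp [hx]))]
    simp

-- a fence-free run in the true state just collects code lines
theorem run_true_clean (pre rest : List String)
    (hpre : ∀ x ∈ pre, (PySem.Str.strip x == "```") = false)
    (acc c : List String) :
    (pre ++ rest).foldl pvStepA (acc, c, true) =
      rest.foldl pvStepA (acc, c ++ pre, true) := by
  induction pre generalizing c with
  | nil => simp
  | cons l t ih =>
    have hl := hpre l (by simp)
    simp only [List.cons_append, List.foldl_cons,
      show pvStepA (acc, c, true) l = (acc, c ++ [l], true) by simp [pvStepA, hl]]
    rw [ih (fun x hx => hpre x (by simp [hx]))]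
    simp

theorem step_open (acc c : List String) (l : String)
    (hl : (PySem.Str.strip l == "```") = true) :
    pvStepA (acc, c, false) l = (acc, [l], true) := by
  simp [pvStepA, hl]

theorem step_close (acc c : List String) (l : String)
    (hl : (PySem.Str.strip l == "```") = true) :
    pvStepA (acc, c, true) l =
      (acc ++ (if (c ++ [l]).length > 9 then
        ["```", "<large code block, visit documentation to view>", "```"] else c ++ [l]),
       (if (c ++ [l]).length > 9 then
        ["```", "<large code block, visit documentation to view>", "```"] else c ++ [l]),
       false) := by
  simp [pvStepA, hl]

theorem main_equiv (ls : List String) :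
    (ls.foldl pvStepA ([], [], false)).1 = pvGo ls := by
  induction hn : ls.length using Nat.strong_induction_on generalizing ls with
  | _ n ih =>
  subst hn
  rw [pvGo.eq_def]
  split
  next h =>
    have e1 : ls.foldl pvStepA ([], [], false) = (ls, [], false) := by
      simpa using run_false_clean ls [] (pvFindFence_none h) [] []
    rw [e1]
  next s h =>
    obtain ⟨pre, l, post, rfl, hlen, hpre, hl⟩ := pvFindFence_some h
    subst hlen
    have e1 : (pre ++ l :: post).foldl pvStepA ([], [], false)
        = (l :: post).foldl pvStepA (pre, [], false) := by
      simpa using run_false_clean pre (l :: post) hpre [] []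
    have e2 : (l :: post).foldl pvStepA (pre, [], false)
        = post.foldl pvStepA (pre, [l], true) := by
      rw [List.foldl_cons, step_open _ _ _ hl]
    have hdrop1 : (pre ++ l :: post).drop (pre.length + 1) = post := by
      rw [show pre ++ l :: post = (pre ++ [l]) ++ post by simp]
      exact List.drop_left' (by simp)
    have htake : (pre ++ l :: post).take pre.length = pre := List.take_left' rfl
    split
    next h2 =>
      rw [hdrop1] at h2
      have e3 : post.foldl pvStepA (pre, [l], true) = (pre, [l] ++ post, true) := by
        simpa using run_true_clean post [] (pvFindFence_none h2) pre [l]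
      rw [e1, e2, e3, htake]
    next e h2 =>
      rw [hdrop1] at h2
      obtain ⟨p2, f2, post2, rfl, hlen2, hp2, hf2⟩ := pvFindFence_some h2
      subst hlen2
      have hsplit : pre ++ l :: (p2 ++ f2 :: post2)
          = (pre ++ (l :: p2 ++ [f2])) ++ post2 := by simp
      have h5 : (pre ++ l :: (p2 ++ f2 :: post2)).take (pre.length + p2.length + 2)
          = pre ++ (l :: p2 ++ [f2]) := by
        rw [hsplit]; exact List.take_left' (by simp; omega)
      have h6 : (pre ++ l :: (p2 ++ f2 :: post2)).drop (pre.length + p2.length + 2)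
          = post2 := by
        rw [hsplit]; exact List.drop_left' (by simp; omega)
      have e3 : (p2 ++ f2 :: post2).foldl pvStepA (pre, [l], true)
          = (f2 :: post2).foldl pvStepA (pre, l :: p2, true) := by
        simpa using run_true_clean p2 (f2 :: post2) hp2 pre [l]
      have hlt : post2.length < (pre ++ l :: (p2 ++ f2 :: post2)).length := by
        simp; omega
      rw [e1, e2, e3, List.foldl_cons, step_close _ _ _ hf2, foldl_acc_append,
          foldl_code_irrel post2 [] _ [], ih post2.length hlt post2 rfl,
          h5, h6, htake]
      simp [List.append_assoc]

-- ===== VERDICT (by name: the statement is the Claim_ definition above) =====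
theorem remove_large_code_blocks_spec : Claim_equal_remove_large_code_blocks := by
  intro text _
  unfold Spec_remove_large_code_blocks remove_large_code_blocks remove_large_code_blocks_alt
  rw [main_equiv]
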